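-- pv_equiv track=rewrite | github.com/SeunghyunWoo99/algorithm-study-2021 | programmers/mock_test/chaeeun.py | solution
-- ===== SOURCE A (Python) =====
-- def solution(answers):
--     l = len(answers)
--     result=[]
--     cnt=[0]*3
--     st1 = [1,2,3,4,5]
--     st2 = [2,1,2,3,2,4,2,5]
--     st3 = [3,3,1,1,2,2,4,4,5,5]
--     for i in range(l):
--         if answers[i]==st1[i%5]:
--             cnt[0]+=1
--         if answers[i] == st2[i%8]:
--             cnt[1] += 1
--         if answers[i]==st3[i%10]:
--             cnt[2]+=1
--     max_score = max(cnt)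
--     for i in range(3):
--         if max_score==cnt[i]:
--             result.append(i+1)
--     return result
-- ===== SOURCE B (Python) =====
-- def solution(answers):
--     # The three patterns all repeat with period dividing 40, so position i behaves
--     # exactly like residue i % 40.  Build a frequency table keyed by (residue, answer)
--     # in one comparison-free pass, then read each pattern's score off the table.
--     keys = [(i % 40, a) for i, a in enumerate(answers)]
--     freq = {}
--     for key in keys:
--         freq[key] = freq.get(key, 0) + 1
--     pats = [[1, 2, 3, 4, 5], [2, 1, 2, 3, 2, 4, 2, 5], [3, 3, 1, 1, 2, 2, 4, 4, 5, 5]]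
--     cnt = [sum(freq.get((r, p[r % len(p)]), 0) for r in range(40)) for p in pats]
--     m = max(cnt)
--     return [k + 1 for k, c in enumerate(cnt) if c == m]
-- ===== Notes on version B (the rewrite author's own statement) =====
-- stated objective: alternative
-- what changed: B replaces A's per-index triple-comparison counting loop with a frequency dictionary keyed by (i % 40, answer) built in one comparison-free pass (40 = lcm of the pattern periods), from which each pattern's score is read off as 40 table lookups.
import Mathlib
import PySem

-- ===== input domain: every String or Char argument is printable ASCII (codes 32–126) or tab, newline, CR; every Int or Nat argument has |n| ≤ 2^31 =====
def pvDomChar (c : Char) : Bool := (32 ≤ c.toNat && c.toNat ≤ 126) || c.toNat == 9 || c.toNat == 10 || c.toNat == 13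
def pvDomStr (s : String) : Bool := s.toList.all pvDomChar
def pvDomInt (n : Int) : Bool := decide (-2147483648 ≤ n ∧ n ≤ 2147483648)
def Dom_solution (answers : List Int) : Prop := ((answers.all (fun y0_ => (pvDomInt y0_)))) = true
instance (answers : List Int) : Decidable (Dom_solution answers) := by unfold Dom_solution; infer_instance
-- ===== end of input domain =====

-- B counts by a frequency dictionary keyed by (i % 40, answer) (40 = lcm of the pattern
-- periods) built in one comparison-free pass, then reads each pattern's score off the
-- table; same O(n) cost, a different data structure.

-- ===== PORT A =====
def solution (answers : List Int) : List Int :=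
  let l := PySem.List.len answers
  let st1 : List Int := [1, 2, 3, 4, 5]
  let st2 : List Int := [2, 1, 2, 3, 2, 4, 2, 5]
  let st3 : List Int := [3, 3, 1, 1, 2, 2, 4, 4, 5, 5]
  let cnt : List Int := (PySem.List.pyRange 0 l 1).foldl (fun cnt i =>
    let cnt := if PySem.List.pyGetD answers i 0 = PySem.List.pyGetD st1 (PySem.Int.mod i 5) 0 then
        cnt.set 0 (cnt.getD 0 0 + 1) else cnt
    let cnt := if PySem.List.pyGetD answers i 0 = PySem.List.pyGetD st2 (PySem.Int.mod i 8) 0 then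
        cnt.set 1 (cnt.getD 1 0 + 1) else cnt
    if PySem.List.pyGetD answers i 0 = PySem.List.pyGetD st3 (PySem.Int.mod i 10) 0 then
        cnt.set 2 (cnt.getD 2 0 + 1) else cnt) [0, 0, 0]
  let maxScore := (PySem.List.max? cnt (fun x => x)).getD 0
  (PySem.List.pyRange 0 3 1).foldl (fun r i =>
    if maxScore = PySem.List.pyGetD cnt i 0 then r ++ [i + 1] else r) []

-- ===== PORT B =====
-- keys = [(i % 40, a) for i, a in enumerate(answers)]
def pvKeys (answers : List Int) : List (Int × Int) :=
  (PySem.List.enumerate answers 0).map (fun p => (PySem.Int.mod p.1 40, p.2))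

-- freq = {}; for key in keys: freq[key] = freq.get(key, 0) + 1
def pvFreq (answers : List Int) : PySem.Dict (Int × Int) Int :=
  (pvKeys answers).foldl (fun d key => d.insert key (d.getD key 0 + 1)) PySem.Dict.empty

-- sum(freq.get((r, p[r % len(p)]), 0) for r in range(40))
def pvPatScore (freq : PySem.Dict (Int × Int) Int) (p : List Int) : Int :=
  (PySem.List.pyRange 0 40 1).foldl (fun s r =>
    s + freq.getD (r, PySem.List.pyGetD p (PySem.Int.mod r (PySem.List.len p)) 0) 0) 0

def solution_alt (answers : List Int) : List Int :=
  let freq := pvFreq answers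
  let cnt : List Int := [pvPatScore freq [1, 2, 3, 4, 5],
                         pvPatScore freq [2, 1, 2, 3, 2, 4, 2, 5],
                         pvPatScore freq [3, 3, 1, 1, 2, 2, 4, 4, 5, 5]]
  let m := (PySem.List.max? cnt (fun x => x)).getD 0
  ((PySem.List.enumerate cnt 0).filter (fun q => q.2 == m)).map (fun q => q.1 + 1)

-- ===== PRECONDITION & SPEC =====
def Spec_solution (answers : List Int) (out : List Int) : Prop := out = solution_alt answers
instance (answers : List Int) (out : List Int) : Decidable (Spec_solution answers out) := by unfold Spec_solution; infer_instance

-- ===== CLAIM (what is proved, stated in full; the proofs are below) =====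
def Claim_equal_solution : Prop := ∀ (answers : List Int), Dom_solution answers → Spec_solution answers (solution answers)

-- ===== LEMMAS AND PROOFS =====

-- A-side characterisation: the fused counter loop computes three indicator sums.

-- indicator of a hit of pattern p at enumerated pair pr
def pvInd (p : List Int) (pr : Int × Int) : Int :=
  if pr.2 = PySem.List.pyGetD p (PySem.Int.mod pr.1 (p.length : Int)) 0 then 1 else 0

-- A's per-pattern score as an indicator sum over enumerate
def pvScore (answers p : List Int) : Int :=
  ((PySem.List.enumerate answers 0).map (pvInd p)).sum

-- the fused triple-counter loop step, written on enumerated pairs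
def pvStep (c : List Int) (pr : Int × Int) : List Int :=
  let c := if pr.2 = PySem.List.pyGetD ([1,2,3,4,5] : List Int) (PySem.Int.mod pr.1 5) 0 then
      c.set 0 (c.getD 0 0 + 1) else c
  let c := if pr.2 = PySem.List.pyGetD ([2,1,2,3,2,4,2,5] : List Int) (PySem.Int.mod pr.1 8) 0 then
      c.set 1 (c.getD 1 0 + 1) else c
  if pr.2 = PySem.List.pyGetD ([3,3,1,1,2,2,4,4,5,5] : List Int) (PySem.Int.mod pr.1 10) 0 then
      c.set 2 (c.getD 2 0 + 1) else c

theorem pvStep_eq (a b c : Int) (pr : Int × Int) :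
    pvStep [a, b, c] pr =
      [a + pvInd [1,2,3,4,5] pr, b + pvInd [2,1,2,3,2,4,2,5] pr,
       c + pvInd [3,3,1,1,2,2,4,4,5,5] pr] := by
  unfold pvStep pvInd
  norm_num
  split_ifs <;> simp [List.set]

theorem pvFold_eq (l : List (Int × Int)) : ∀ (a b c : Int),
    l.foldl pvStep [a, b, c] =
      [a + (l.map (pvInd [1,2,3,4,5])).sum,
       b + (l.map (pvInd [2,1,2,3,2,4,2,5])).sum,
       c + (l.map (pvInd [3,3,1,1,2,2,4,4,5,5])).sum] := by
  induction l with
  | nil => intro a b c; simp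
  | cons p t ih =>
    intro a b c
    rw [List.foldl_cons, pvStep_eq, ih]
    simp [add_assoc]

theorem pvCnt_eq (answers : List Int) :
    (PySem.List.pyRange 0 (PySem.List.len answers) 1).foldl (fun cnt i =>
        let cnt := if PySem.List.pyGetD answers i 0 = PySem.List.pyGetD ([1,2,3,4,5] : List Int) (PySem.Int.mod i 5) 0 then
            cnt.set 0 (cnt.getD 0 0 + 1) else cnt
        let cnt := if PySem.List.pyGetD answers i 0 = PySem.List.pyGetD ([2,1,2,3,2,4,2,5] : List Int) (PySem.Int.mod i 8) 0 then
            cnt.set 1 (cnt.getD 1 0 + 1) else cnt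
        if PySem.List.pyGetD answers i 0 = PySem.List.pyGetD ([3,3,1,1,2,2,4,4,5,5] : List Int) (PySem.Int.mod i 10) 0 then
            cnt.set 2 (cnt.getD 2 0 + 1) else cnt) ([0, 0, 0] : List Int) =
      [pvScore answers [1,2,3,4,5], pvScore answers [2,1,2,3,2,4,2,5],
       pvScore answers [3,3,1,1,2,2,4,4,5,5]] := by
  have hfun : (fun (cnt : List Int) (i : Int) =>
        let cnt := if PySem.List.pyGetD answers i 0 = PySem.List.pyGetD ([1,2,3,4,5] : List Int) (PySem.Int.mod i 5) 0 then
            cnt.set 0 (cnt.getD 0 0 + 1) else cnt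
        let cnt := if PySem.List.pyGetD answers i 0 = PySem.List.pyGetD ([2,1,2,3,2,4,2,5] : List Int) (PySem.Int.mod i 8) 0 then
            cnt.set 1 (cnt.getD 1 0 + 1) else cnt
        if PySem.List.pyGetD answers i 0 = PySem.List.pyGetD ([3,3,1,1,2,2,4,4,5,5] : List Int) (PySem.Int.mod i 10) 0 then
            cnt.set 2 (cnt.getD 2 0 + 1) else cnt) =
      (fun (c : List Int) (j : Int) => pvStep c (j, PySem.List.pyGetD answers j 0)) := rfl
  have h : (PySem.List.enumerate answers 0).foldl pvStep ([0,0,0] : List Int) =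
      (PySem.List.pyRange 0 (PySem.List.len answers) 1).foldl
        (fun c j => pvStep c (j, PySem.List.pyGetD answers j 0)) [0,0,0] := by
    rw [PySem.List.enumerate_eq_map_pyRange (d := 0), List.foldl_map]
  rw [hfun, ← h, pvFold_eq]
  simp [pvScore]

-- B-side characterisation.

theorem pvFreq_getD (answers : List Int) (key : Int × Int) :
    (pvFreq answers).getD key 0 = ((pvKeys answers).count key : Int) := by
  unfold pvFreq
  rw [PySem.Dict.foldl_insert_getD_add_one_eq_counter, PySem.Dict.getD_counter]

-- sum of a 0/1 indicator of "r = x" over a nodup list containing x is 1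
theorem pv_sum_ite_eq_of_nodup (l : List Int) (x : Int) (hn : l.Nodup) (hx : x ∈ l) :
    (l.map (fun r => if r = x then (1:Int) else 0)).sum = 1 := by
  induction l with
  | nil => cases hx
  | cons a t ih =>
    by_cases hax : a = x
    · subst hax
      have hnot : a ∉ t := (List.nodup_cons.mp hn).1
      have hz : (t.map (fun r => if r = a then (1:Int) else 0)).sum = 0 := by
        apply List.sum_eq_zero
        intro y hy
        rcases List.mem_map.mp hy with ⟨r, hr, hry⟩
        subst hry
        have : r ≠ a := fun h => hnot (h ▸ hr)
        simp [this]
      simp [hz]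
    · have hx' : x ∈ t := by
        rcases List.mem_cons.mp hx with h | h
        · exact absurd h.symm hax
        · exact h
      have := ih (List.nodup_cons.mp hn).2 hx'
      simp [hax, this]

-- grouped count over the 40 residues equals the elementwise indicator sum
theorem pv_sum_count (v : Int → Int) (k : List (Int × Int))
    (hb : ∀ q ∈ k, 0 ≤ q.1 ∧ q.1 < 40) :
    ((PySem.List.pyRange 0 40 1).map (fun r => ((k.count (r, v r)) : Int))).sum
      = (k.map (fun q => if q.2 = v q.1 then (1:Int) else 0)).sum := by
  induction k with
  | nil => simp
  | cons q t ih =>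
    obtain ⟨hq0, hq1⟩ := hb q List.mem_cons_self
    have ht : ∀ p ∈ t, 0 ≤ p.1 ∧ p.1 < 40 := fun p hp => hb p (List.mem_cons_of_mem _ hp)
    have hsplit : ∀ r : Int, ((List.count (r, v r) (q :: t) : Nat) : Int)
        = (t.count (r, v r) : Int) + (if (r, v r) = q then (1:Int) else 0) := by
      intro r
      rw [List.count_cons]
      by_cases h : (r, v r) = q
      · simp [h]
      · have h' : ¬ q = (r, v r) := fun hh => h hh.symm
        simp [h, h']
    have hinner : ((PySem.List.pyRange 0 40 1).map (fun r => if (r, v r) = q then (1:Int) else 0)).sum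
        = if q.2 = v q.1 then (1:Int) else 0 := by
      by_cases hv : q.2 = v q.1
      · have hfun : (fun r => if (r, v r) = q then (1:Int) else 0)
            = (fun r => if r = q.1 then (1:Int) else 0) := by
          funext r
          by_cases hr : r = q.1
          · subst hr; simp [hv.symm]
          · simp [Prod.ext_iff, hr]
        rw [hfun, if_pos hv,
            pv_sum_ite_eq_of_nodup _ _ (PySem.List.nodup_pyRange_one 0 40)
              ((PySem.List.mem_pyRange_one).mpr ⟨hq0, hq1⟩)]
      · rw [if_neg hv]
        apply List.sum_eq_zero
        intro y hy
        rcases List.mem_map.mp hy with ⟨r, _, hry⟩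
        subst hry
        have hne : (r, v r) ≠ q := by
          intro h
          apply hv
          have h1 : r = q.1 := congrArg Prod.fst h
          have h2 : v r = q.2 := congrArg Prod.snd h
          rw [← h2, h1]
        simp [hne]
    calc ((PySem.List.pyRange 0 40 1).map (fun r => (((q :: t).count (r, v r) : Nat) : Int))).sum
        = ((PySem.List.pyRange 0 40 1).map (fun r =>
            (t.count (r, v r) : Int) + (if (r, v r) = q then (1:Int) else 0))).sum := by
          exact congrArg List.sum (List.map_congr_left (fun r _ => hsplit r))
      _ = ((PySem.List.pyRange 0 40 1).map (fun r => (t.count (r, v r) : Int))).sum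
            + ((PySem.List.pyRange 0 40 1).map (fun r => if (r, v r) = q then (1:Int) else 0)).sum :=
          PySem.List.sum_map_add_int _ _ _
      _ = (t.map (fun p => if p.2 = v p.1 then (1:Int) else 0)).sum
            + (if q.2 = v q.1 then (1:Int) else 0) := by rw [ih ht, hinner]
      _ = ((q :: t).map (fun p => if p.2 = v p.1 then (1:Int) else 0)).sum := by
          simp [add_comm]

-- per-pattern: B's table read equals A's indicator score
theorem pvPatScore_eq (answers p : List Int)
    (hdvd : ((p.length : Int)) ∣ 40) :
    pvPatScore (pvFreq answers) p = pvScore answers p := by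
  have hpos : (0:Int) < (p.length : Int) := by
    rcases Nat.eq_zero_or_pos p.length with h | h
    · exfalso; rw [h] at hdvd; norm_num at hdvd
    · exact_mod_cast h
  unfold pvPatScore
  rw [PySem.List.foldl_add, zero_add]
  have hgv : (fun r => (pvFreq answers).getD
        (r, PySem.List.pyGetD p (PySem.Int.mod r (PySem.List.len p)) 0) 0)
      = (fun r => (((pvKeys answers).count
        (r, PySem.List.pyGetD p (PySem.Int.mod r (PySem.List.len p)) 0) : Nat) : Int)) := by
    funext r; exact pvFreq_getD answers _
  rw [hgv, pv_sum_count (fun r => PySem.List.pyGetD p (PySem.Int.mod r (PySem.List.len p)) 0)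
        (pvKeys answers) ?hb]
  case hb =>
    intro q hq
    rcases List.mem_map.mp hq with ⟨pr, _, hpr⟩
    subst hpr
    exact ⟨PySem.Int.mod_nonneg _ (by norm_num), PySem.Int.mod_lt _ (by norm_num)⟩
  unfold pvKeys pvScore
  rw [List.map_map]
  apply congrArg List.sum
  apply List.map_congr_left
  intro pr _
  unfold pvInd
  simp only [Function.comp]
  congr 2
  simp only [PySem.List.len_eq, PySem.Int.mod_eq_emod_of_pos hpos,
      PySem.Int.mod_eq_emod_of_pos (show (0:Int) < 40 by norm_num)]
  rw [Int.emod_emod_of_dvd _ hdvd]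

-- ===== VERDICT (by name: the statement is the Claim_ definition above) =====
set_option maxHeartbeats 1000000 in
set_option maxRecDepth 4000 in
theorem solution_spec : Claim_equal_solution := by
  intro answers _
  unfold Spec_solution
  simp only [solution, solution_alt]
  rw [pvCnt_eq,
      pvPatScore_eq answers [1,2,3,4,5] (by decide),
      pvPatScore_eq answers [2,1,2,3,2,4,2,5] (by decide),
      pvPatScore_eq answers [3,3,1,1,2,2,4,4,5,5] (by decide)]
  set s1 := pvScore answers [1,2,3,4,5]
  set s2 := pvScore answers [2,1,2,3,2,4,2,5]
  set s3 := pvScore answers [3,3,1,1,2,2,4,4,5,5]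
  have hr : PySem.List.pyRange 0 3 1 = [0, 1, 2] := by decide
  rw [hr]
  simp only [List.foldl_cons, List.foldl_nil, PySem.List.enumerate_cons,
    PySem.List.enumerate_nil, List.filter_cons, List.filter_nil]
  set m := (PySem.List.max? ([s1, s2, s3] : List Int) (fun x => x)).getD 0 with hm
  simp only [PySem.List.pyGetD]
  norm_num
  rw [show [s1, s2, s3][Int.toNat 2] = s3 from rfl]
  split_ifs <;> simp <;> omega
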